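-- pv_equiv track=rewrite | github.com/Arthur-Dauphole/Projet-BRAIN | Arthur_2/BRAIN_PROJECT/modules/detector.py | _check_t_left
-- ===== SOURCE A (Python) =====
-- def _check_t_left(pixel_set, min_r, min_c, max_r, max_c, height, width):
--     """T with bar at right, stem going left."""
--     center_r = (min_r + max_r) // 2
--     expected = set()
--     for r in range(min_r, max_r + 1):
--         expected.add((r, max_c))
--     for c in range(min_c, max_c + 1):
--         expected.add((center_r, c))
--     return pixel_set == expected
-- ===== SOURCE B (Python) =====
-- def _check_t_left(pixel_set, min_r, min_c, max_r, max_c, height, width):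
--     """T with bar at right, stem going left: verified by count + membership predicate,
--     without materializing the expected set."""
--     center_r = (min_r + max_r) // 2
--     bar = max_r - min_r + 1
--     stem = max_c - min_c + 1
--     count = max(bar, 0) + max(stem, 0) - (1 if bar > 0 and stem > 0 else 0)
--     if len(pixel_set) != count:
--         return False
--     return all((c == max_c and min_r <= r <= max_r) or
--                (r == center_r and min_c <= c <= max_c)
--                for (r, c) in pixel_set)
-- ===== Notes on version B (the rewrite author's own statement) =====
-- stated objective: faster
-- what changed: Instead of materializing the expected T-shaped set and comparing for set equality, B checks the cardinality against a closed-form count (with correct handling of empty bar/stem and of the single bar-stem overlap cell) and verifies every pixel satisfies the bar-or-stem membership predicate.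
import Mathlib
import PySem

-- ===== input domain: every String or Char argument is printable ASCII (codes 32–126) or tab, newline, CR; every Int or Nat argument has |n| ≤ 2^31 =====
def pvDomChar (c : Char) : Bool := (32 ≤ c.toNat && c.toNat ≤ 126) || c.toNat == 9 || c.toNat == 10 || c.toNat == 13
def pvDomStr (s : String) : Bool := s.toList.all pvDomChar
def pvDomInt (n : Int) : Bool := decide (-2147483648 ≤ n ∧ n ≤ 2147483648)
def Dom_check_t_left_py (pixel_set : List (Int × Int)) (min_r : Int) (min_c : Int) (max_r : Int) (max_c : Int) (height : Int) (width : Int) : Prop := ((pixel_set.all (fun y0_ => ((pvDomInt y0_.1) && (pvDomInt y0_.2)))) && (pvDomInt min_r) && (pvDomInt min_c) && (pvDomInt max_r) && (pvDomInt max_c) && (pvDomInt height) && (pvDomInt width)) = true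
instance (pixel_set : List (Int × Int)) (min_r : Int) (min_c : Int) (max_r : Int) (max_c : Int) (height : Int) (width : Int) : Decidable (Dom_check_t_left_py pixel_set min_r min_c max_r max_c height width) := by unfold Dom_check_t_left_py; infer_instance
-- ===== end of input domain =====

-- ===== PORT A =====
-- B changes the decomposition: count + predicate check instead of building the expected set; return-value equivalence on duplicate-free pixel lists.
def check_t_left_py (pixel_set : List (Int × Int)) (min_r : Int) (min_c : Int) (max_r : Int) (max_c : Int) (height : Int) (width : Int) : Bool :=
  let center_r : Int := PySem.Int.floordiv (min_r + max_r) 2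
  -- Python's 'expected' set is only built by .add and compared as a finite set at the end;
  -- it is modelled with Std.HashSet (a hash set, like Python's) and the final '==' as set equality.
  let expected : Std.HashSet (Int × Int) := ∅
  let expected := (PySem.List.pyRange min_r (max_r + 1) 1).foldl
    (fun s r => s.insert (r, max_c)) expected
  let expected := (PySem.List.pyRange min_c (max_c + 1) 1).foldl
    (fun s c => s.insert (center_r, c)) expected
  PySem.Set.equal pixel_set expected.toList

-- ===== PORT B =====
def check_t_left_py_alt (pixel_set : List (Int × Int)) (min_r : Int) (min_c : Int) (max_r : Int) (max_c : Int) (height : Int) (width : Int) : Bool :=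
  let center_r : Int := PySem.Int.floordiv (min_r + max_r) 2
  let bar : Int := max_r - min_r + 1
  let stem : Int := max_c - min_c + 1
  let count : Int := max bar 0 + max stem 0 - (if bar > 0 ∧ stem > 0 then 1 else 0)
  if (pixel_set.length : Int) ≠ count then false
  else pixel_set.all (fun p =>
    (p.2 == max_c && decide (min_r ≤ p.1) && decide (p.1 ≤ max_r)) ||
    (p.1 == center_r && decide (min_c ≤ p.2) && decide (p.2 ≤ max_c)))

-- ===== PRECONDITION & SPEC =====
-- Pre_ only requires pixel_set to be duplicate-free: the Python argument is a set, encoded by convention as the list of its distinct elements.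
def Pre_check_t_left_py (pixel_set : List (Int × Int)) (min_r : Int) (min_c : Int) (max_r : Int) (max_c : Int) (height : Int) (width : Int) : Prop :=
  pixel_set.Nodup
instance (pixel_set : List (Int × Int)) (min_r : Int) (min_c : Int) (max_r : Int) (max_c : Int) (height : Int) (width : Int) : Decidable (Pre_check_t_left_py pixel_set min_r min_c max_r max_c height width) := by unfold Pre_check_t_left_py; infer_instance
def pvWitness_check_t_left_py : (List (Int × Int)) × Int × Int × Int × Int × Int × Int :=
  ([(0, 2), (1, 2), (2, 2), (1, 0), (1, 1)], 0, 0, 2, 2, 3, 3)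
def Spec_check_t_left_py (pixel_set : List (Int × Int)) (min_r : Int) (min_c : Int) (max_r : Int) (max_c : Int) (height : Int) (width : Int) (out : Bool) : Prop := out = check_t_left_py_alt pixel_set min_r min_c max_r max_c height width
instance (pixel_set : List (Int × Int)) (min_r : Int) (min_c : Int) (max_r : Int) (max_c : Int) (height : Int) (width : Int) (out : Bool) : Decidable (Spec_check_t_left_py pixel_set min_r min_c max_r max_c height width out) := by unfold Spec_check_t_left_py; infer_instance

-- ===== CLAIM (what is proved, stated in full; the proofs are below) =====
def Claim_equal_check_t_left_py : Prop := ∀ (pixel_set : List (Int × Int)) (min_r : Int) (min_c : Int) (max_r : Int) (max_c : Int) (height : Int) (width : Int), Dom_check_t_left_py pixel_set min_r min_c max_r max_c height width → Pre_check_t_left_py pixel_set min_r min_c max_r max_c height width → Spec_check_t_left_py pixel_set min_r min_c max_r max_c height width (check_t_left_py pixel_set min_r min_c max_r max_c height width)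

-- ===== LEMMAS AND PROOFS =====

-- The expected set A builds (as a PySem.Set), and the membership predicate B checks.
def pvE (min_r min_c max_r max_c : Int) : PySem.Set (Int × Int) :=
  (PySem.List.pyRange min_c (max_c + 1) 1).foldl
    (fun s c => PySem.Set.add s (PySem.Int.floordiv (min_r + max_r) 2, c))
    ((PySem.List.pyRange min_r (max_r + 1) 1).foldl
      (fun s r => PySem.Set.add s (r, max_c)) PySem.Set.empty)

def pvEH (min_r min_c max_r max_c : Int) : Std.HashSet (Int × Int) :=
  (PySem.List.pyRange min_c (max_c + 1) 1).foldl
    (fun s c => s.insert (PySem.Int.floordiv (min_r + max_r) 2, c))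
    ((PySem.List.pyRange min_r (max_r + 1) 1).foldl
      (fun s r => s.insert (r, max_c)) ∅)

def pvPred (min_r min_c max_r max_c : Int) (p : Int × Int) : Prop :=
  (p.2 = max_c ∧ min_r ≤ p.1 ∧ p.1 ≤ max_r) ∨
  (p.1 = PySem.Int.floordiv (min_r + max_r) 2 ∧ min_c ≤ p.2 ∧ p.2 ≤ max_c)

theorem pvE_mem (min_r min_c max_r max_c : Int) (p : Int × Int) :
    p ∈ pvE min_r min_c max_r max_c ↔ pvPred min_r min_c max_r max_c p := by
  unfold pvE pvPred
  rw [PySem.Set.mem_foldl_add, PySem.Set.mem_foldl_add]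
  simp only [PySem.List.mem_pyRange_one, PySem.Set.empty, List.not_mem_nil, false_or,
    Prod.ext_iff]
  constructor
  · rintro (⟨r, hr, h1, h2⟩ | ⟨c, hc, h1, h2⟩)
    · exact Or.inl ⟨h2, by omega⟩
    · exact Or.inr ⟨h1, by omega⟩
  · rintro (⟨h1, h2, h3⟩ | ⟨h1, h2, h3⟩)
    · exact Or.inl ⟨p.1, ⟨h2, by omega⟩, rfl, h1⟩
    · exact Or.inr ⟨p.2, ⟨h2, by omega⟩, h1, rfl⟩

theorem pv_mem_foldl_insert {β : Type} (l : List β) (f : β → Int × Int)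
    (s : Std.HashSet (Int × Int)) (y : Int × Int) :
    y ∈ l.foldl (fun s b => s.insert (f b)) s ↔ y ∈ s ∨ ∃ b ∈ l, y = f b := by
  induction l generalizing s with
  | nil => simp
  | cons a l ih =>
    rw [List.foldl_cons, ih]
    simp only [Std.HashSet.mem_insert, beq_iff_eq, List.mem_cons]
    aesop

theorem pvEH_toList_mem (min_r min_c max_r max_c : Int) (p : Int × Int) :
    p ∈ (pvEH min_r min_c max_r max_c).toList ↔ p ∈ pvE min_r min_c max_r max_c := by
  rw [Std.HashSet.mem_toList]
  unfold pvEH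
  rw [pv_mem_foldl_insert, pv_mem_foldl_insert, pvE_mem]
  unfold pvPred
  simp only [Std.HashSet.not_mem_empty, false_or, PySem.List.mem_pyRange_one, Prod.ext_iff]
  constructor
  · rintro (⟨r, hr, h1, h2⟩ | ⟨c, hc, h1, h2⟩)
    · exact Or.inl ⟨h2, by omega⟩
    · exact Or.inr ⟨h1, by omega⟩
  · rintro (⟨h1, h2, h3⟩ | ⟨h1, h2, h3⟩)
    · exact Or.inl ⟨p.1, ⟨h2, by omega⟩, rfl, h1⟩
    · exact Or.inr ⟨p.2, ⟨h2, by omega⟩, h1, rfl⟩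

theorem pvEH_toList_nodup (min_r min_c max_r max_c : Int) :
    (pvEH min_r min_c max_r max_c).toList.Nodup :=
  Std.HashSet.distinct_toList.imp (fun h => by simpa using h)

-- pvE as an append, for the nodup/length computation
theorem pvE_eq (min_r min_c max_r max_c : Int) :
    pvE min_r min_c max_r max_c =
      PySem.Set.update
        (PySem.Set.ofList ((PySem.List.pyRange min_r (max_r + 1) 1).map (fun r => (r, max_c))))
        ((PySem.List.pyRange min_c (max_c + 1) 1).map
          (fun c => (PySem.Int.floordiv (min_r + max_r) 2, c))) := by
  unfold pvE
  rw [← PySem.Set.update_empty, ← PySem.Set.update_map_eq_foldl_add,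
    ← PySem.Set.update_map_eq_foldl_add]

theorem pv_nodup_bar (min_r max_r v : Int) :
    ((PySem.List.pyRange min_r (max_r + 1) 1).map (fun r => (r, v))).Nodup :=
  (PySem.List.nodup_pyRange_one _ _).map (fun a b h => by
    simpa using congrArg Prod.fst h)

theorem pv_nodup_stem (min_c max_c v : Int) :
    ((PySem.List.pyRange min_c (max_c + 1) 1).map (fun c => (v, c))).Nodup :=
  (PySem.List.nodup_pyRange_one _ _).map (fun a b h => by
    simpa using congrArg Prod.snd h)

theorem pvE_nodup (min_r min_c max_r max_c : Int) :
    (pvE min_r min_c max_r max_c).Nodup := by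
  rw [pvE_eq]
  exact PySem.Set.nodup_update _ _ (PySem.Set.nodup_ofList _)

theorem pv_floordiv_two (x : Int) : PySem.Int.floordiv x 2 = x / 2 := by
  simp [PySem.Int.floordiv]
  rw [Int.fdiv_eq_ediv]; simp

theorem pv_hmem (min_r max_r max_c : Int) (hbar : min_r ≤ max_r) (c : Int) :
    PySem.Set.contains ((PySem.List.pyRange min_r (max_r + 1) 1).map (fun r => (r, max_c)))
      (PySem.Int.floordiv (min_r + max_r) 2, c) = decide (c = max_c) := by
  have h1 : min_r ≤ (min_r + max_r) / 2 := by omega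
  have h2 : (min_r + max_r) / 2 ≤ max_r := by omega
  simp [PySem.Set.contains_eq_listContains, PySem.List.mem_pyRange_one, Prod.ext_iff, h1, h2]
  exact eq_comm

theorem pvE_length (min_r min_c max_r max_c : Int) :
    ((pvE min_r min_c max_r max_c).length : Int) =
      max (max_r - min_r + 1) 0 + max (max_c - min_c + 1) 0 -
        (if max_r - min_r + 1 > 0 ∧ max_c - min_c + 1 > 0 then 1 else 0) := by
  rw [pvE_eq, PySem.Set.ofList_eq_self_of_nodup _ (pv_nodup_bar _ _ _),
    PySem.Set.update_eq_append_filter,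
    PySem.Set.ofList_eq_self_of_nodup _ (pv_nodup_stem _ _ _)]
  rw [List.length_append, List.length_map, PySem.List.length_pyRange_one]
  rw [List.filter_map, List.length_map]
  by_cases hbar : min_r ≤ max_r
  · have hfc : (PySem.List.pyRange min_c (max_c + 1) 1).filter
        ((fun y => !PySem.Set.contains
            ((PySem.List.pyRange min_r (max_r + 1) 1).map (fun r => (r, max_c))) y) ∘
          fun c => (PySem.Int.floordiv (min_r + max_r) 2, c))
        = (PySem.List.pyRange min_c (max_c + 1) 1).filter (fun c => !decide (c = max_c)) := by
      apply List.filter_congr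
      intro c _
      simp only [Function.comp_apply]
      rw [pv_hmem min_r max_r max_c hbar c]
    rw [hfc]
    by_cases hstem : min_c ≤ max_c
    · rw [PySem.List.pyRange_one_succ_right hstem, List.filter_append]
      have h1 : (PySem.List.pyRange min_c max_c 1).filter (fun c => !decide (c = max_c))
          = PySem.List.pyRange min_c max_c 1 := by
        apply List.filter_eq_self.2
        intro c hc
        have := PySem.List.mem_pyRange_one.1 hc
        simp; omega
      have h2 : ([max_c] : List Int).filter (fun c => !decide (c = max_c)) = [] := by simp
      rw [h1, h2, List.length_append, PySem.List.length_pyRange_one]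
      simp; omega
    · have hnil : PySem.List.pyRange min_c (max_c + 1) 1 = [] := by
        apply List.eq_nil_of_length_eq_zero
        rw [PySem.List.length_pyRange_one]; omega
      rw [hnil]
      simp; omega
  · have hnil : PySem.List.pyRange min_r (max_r + 1) 1 = [] := by
      apply List.eq_nil_of_length_eq_zero
      rw [PySem.List.length_pyRange_one]; omega
    rw [hnil]
    simp only [List.map_nil]
    have hfc : ∀ l : List Int, l.filter
        ((fun y => !PySem.Set.contains ([] : List (Int × Int)) y) ∘
          fun c => (PySem.Int.floordiv (min_r + max_r) 2, c)) = l := by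
      intro l
      apply List.filter_eq_self.2
      intro c _
      simp [PySem.Set.contains_eq_listContains]
    rw [hfc, PySem.List.length_pyRange_one]
    simp; omega

-- ===== VERDICT (by name: the statement is the Claim_ definition above) =====
theorem check_t_left_py_spec : Claim_equal_check_t_left_py := by
  intro ps min_r min_c max_r max_c height width _ hpre
  unfold Spec_check_t_left_py check_t_left_py check_t_left_py_alt
  simp only []
  have hE : ∀ p, p ∈ (pvEH min_r min_c max_r max_c).toList ↔
      pvPred min_r min_c max_r max_c p :=
    fun p => (pvEH_toList_mem min_r min_c max_r max_c p).trans (pvE_mem min_r min_c max_r max_c p)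
  have hnodE := pvEH_toList_nodup min_r min_c max_r max_c
  have hlen : ((pvEH min_r min_c max_r max_c).toList.length : Int) =
      max (max_r - min_r + 1) 0 + max (max_c - min_c + 1) 0 -
        (if max_r - min_r + 1 > 0 ∧ max_c - min_c + 1 > 0 then 1 else 0) := by
    have hperm : (pvEH min_r min_c max_r max_c).toList.Perm (pvE min_r min_c max_r max_c) :=
      (List.perm_ext_iff_of_nodup hnodE (pvE_nodup min_r min_c max_r max_c)).2
        (pvEH_toList_mem min_r min_c max_r max_c)
    rw [hperm.length_eq]
    exact pvE_length min_r min_c max_r max_c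
  rw [Bool.eq_iff_iff]
  rw [show ((PySem.List.pyRange min_c (max_c + 1) 1).foldl
      (fun s c => s.insert (PySem.Int.floordiv (min_r + max_r) 2, c))
      ((PySem.List.pyRange min_r (max_r + 1) 1).foldl
        (fun s r => s.insert (r, max_c)) ∅)) = pvEH min_r min_c max_r max_c from rfl]
  rw [PySem.Set.equal_iff]
  constructor
  · intro hall
    have hperm : ps.Perm ((pvEH min_r min_c max_r max_c).toList) :=
      (List.perm_ext_iff_of_nodup hpre hnodE).2 hall
    have hl : (ps.length : Int) =
        max (max_r - min_r + 1) 0 + max (max_c - min_c + 1) 0 -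
          (if max_r - min_r + 1 > 0 ∧ max_c - min_c + 1 > 0 then 1 else 0) := by
      rw [hperm.length_eq]; exact hlen
    rw [if_neg (by omega)]
    apply List.all_eq_true.2
    intro p hp
    have := (hE p).1 ((hall p).1 hp)
    unfold pvPred at this
    rcases this with ⟨h1, h2, h3⟩ | ⟨h1, h2, h3⟩
    · simp [h1, h2, h3]
    · simp [h1, h2, h3]
  · intro hB
    by_cases hcnt : (ps.length : Int) =
        max (max_r - min_r + 1) 0 + max (max_c - min_c + 1) 0 -
          (if max_r - min_r + 1 > 0 ∧ max_c - min_c + 1 > 0 then 1 else 0)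
    · rw [if_neg (by omega)] at hB
      have hsub : ps ⊆ (pvEH min_r min_c max_r max_c).toList := by
        intro p hp
        have := List.all_eq_true.1 hB p hp
        apply (hE p).2
        unfold pvPred
        rcases Bool.or_eq_true_iff.1 this with h | h
        · simp at h; exact Or.inl ⟨h.1.1, h.1.2, h.2⟩
        · simp at h
          refine Or.inr ⟨?_, h.1.2, h.2⟩
          rw [pv_floordiv_two]; exact h.1.1
      have hsp : ps.Subperm ((pvEH min_r min_c max_r max_c).toList) := hpre.subperm hsub
      have hlen2 : (pvEH min_r min_c max_r max_c).toList.length ≤ ps.length := by omega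
      have hperm := hsp.perm_of_length_le hlen2
      intro x
      exact hperm.mem_iff
    · rw [if_pos (by omega)] at hB
      exact absurd hB (by simp)
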